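-- pv_equiv track=rewrite | github.com/samuelhwilliams/advent-of-code | 2023/day_03.py | yield_valid_parts
-- ===== SOURCE A (Python) =====
-- import itertools
-- import string
-- from typing import Iterator
--
-- def get_part_border_coords(x, y1, y2) -> Iterator[tuple[int, int]]:
--     return itertools.chain(
--         [(x - 1, y) for y in range(y1 - 1, y2 + 1)],
--         [(x, y1 - 1)],
--         [(x, y2)],
--         [(x + 1, y) for y in range(y1 - 1, y2 + 1)],
--     )
--
-- def yield_valid_parts(
--     grid, parts_with_boundaries: Iterator[tuple[int, tuple[int, int], tuple[int, int]]]
-- ) -> Iterator[int]: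
--     """
--     Take a list of (part_num, (x, y1), (x, y2)) entries and check if any of its border coords is a non-period symbol.
--     """
--     symbols = set(string.punctuation)
--     symbols.remove(".")
--
--     for part_number, start, stop in parts_with_boundaries:  # type: int, tuple[int, int], tuple[int, int]
--         for x, y in get_part_border_coords(start[0], start[1], stop[1]):
--             if 0 <= x < len(grid) and 0 <= y < len(grid[x]):
--                 if grid[x][y] in symbols:
--                     yield part_number
--                     break
-- ===== SOURCE B (Python) =====
-- import string
--
--
-- def yield_valid_parts(grid, parts_with_boundaries):
--     symbols = set(string.punctuation) - {"."}
--     # Stage 1: one pass over the grid collecting every symbol's coordinates.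
--     symbol_positions = [
--         (sx, sy)
--         for sx, row in enumerate(grid)
--         for sy, ch in enumerate(row)
--         if ch in symbols
--     ]
--     # Stage 2: no border cells are enumerated at all — a symbol (sx, sy) is
--     # adjacent to the part iff it lies on the side columns (y1-1 or y2) of the
--     # part's own row, or in the rows above/below within [y1-1, y2].
--     for part_number, start, stop in parts_with_boundaries:
--         x, y1 = start
--         y2 = stop[1]
--         if any(
--             (sx == x and (sy == y1 - 1 or sy == y2))
--             or ((sx == x - 1 or sx == x + 1) and y1 - 1 <= sy <= y2)
--             for sx, sy in symbol_positions
--         ):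
--             yield part_number
-- ===== Notes on version B (the rewrite author's own statement) =====
-- stated objective: alternative
-- what changed: B never enumerates a part's border cells: it collects all symbol coordinates in one grid pass, then decides each part by a purely arithmetic interval/adjacency test (sx in {x-1,x,x+1}, sy in [y1-1,y2] with the middle row restricted to its two end columns) against that list, replacing A's per-border-cell grid indexing with bounds checks.
import Mathlib
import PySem

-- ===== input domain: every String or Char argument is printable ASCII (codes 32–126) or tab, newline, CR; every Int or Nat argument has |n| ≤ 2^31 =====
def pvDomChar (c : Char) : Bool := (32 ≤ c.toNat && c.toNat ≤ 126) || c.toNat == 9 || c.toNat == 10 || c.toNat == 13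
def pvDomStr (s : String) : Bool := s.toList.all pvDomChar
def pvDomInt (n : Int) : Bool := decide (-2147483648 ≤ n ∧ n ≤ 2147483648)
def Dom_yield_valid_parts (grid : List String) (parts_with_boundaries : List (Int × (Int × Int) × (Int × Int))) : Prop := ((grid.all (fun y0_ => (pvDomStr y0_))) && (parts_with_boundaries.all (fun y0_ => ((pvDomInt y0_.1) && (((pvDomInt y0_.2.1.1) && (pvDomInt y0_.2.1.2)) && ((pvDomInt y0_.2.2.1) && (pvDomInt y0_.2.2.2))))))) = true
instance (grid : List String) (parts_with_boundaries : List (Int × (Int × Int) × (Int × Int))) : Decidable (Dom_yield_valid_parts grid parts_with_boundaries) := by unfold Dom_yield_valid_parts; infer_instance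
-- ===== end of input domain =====

-- B collects all symbol coordinates in one grid pass and decides each part by a purely
-- arithmetic interval/adjacency test against that list, never enumerating border cells;
-- same return value, no speed claim.

-- ===== PORT A =====
-- string.punctuation
def pvPunct : List Char := "!\"#$%&'()*+,-./:;<=>?@[\\]^_`{|}~".toList

-- symbols = set(string.punctuation); symbols.remove(".")  ('.' is present, so remove = discard)
def pvSymbolsA : PySem.Set Char := PySem.Set.discard (PySem.Set.ofList pvPunct) '.'

-- get_part_border_coords(x, y1, y2)
def get_part_border_coords (x y1 y2 : Int) : List (Int × Int) :=
  ((PySem.List.pyRange (y1 - 1) (y2 + 1) 1).map (fun y => (x - 1, y)))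
    ++ [(x, y1 - 1)] ++ [(x, y2)]
    ++ ((PySem.List.pyRange (y1 - 1) (y2 + 1) 1).map (fun y => (x + 1, y)))

-- A's inner 'for … if …: yield; break' loop: true iff the loop yields for this part
def pvHitA (grid : List String) : List (Int × Int) → Bool
  | [] => false
  | (x, y) :: rest =>
    if 0 ≤ x ∧ x < (grid.length : Int) then
      let row := (PySem.List.pyGetD grid x "").toList   -- grid[x], in range under the guard
      if 0 ≤ y ∧ y < (row.length : Int) then
        if PySem.Set.contains pvSymbolsA (PySem.List.pyGetD row y ' ') then true
        else pvHitA grid rest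
      else pvHitA grid rest
    else pvHitA grid rest

def yield_valid_parts (grid : List String) (parts_with_boundaries : List (Int × (Int × Int) × (Int × Int))) : List Int :=
  parts_with_boundaries.foldl
    (fun acc p =>
      if pvHitA grid (get_part_border_coords p.2.1.1 p.2.1.2 p.2.2.2) then acc ++ [p.1] else acc)
    []

-- ===== PORT B =====
-- symbols = set(string.punctuation) - {"."}
def pvSymbolsB : PySem.Set Char := PySem.Set.diff (PySem.Set.ofList pvPunct) ['.']

-- [(sx, sy) for sx, row in enumerate(grid) for sy, ch in enumerate(row) if ch in symbols]
def pvSymbolPositions (grid : List String) : List (Int × Int) :=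
  (PySem.List.enumerate grid 0).flatMap (fun r =>
    (PySem.List.enumerate r.2.toList 0).filterMap (fun c =>
      if PySem.Set.contains pvSymbolsB c.2 then some (r.1, c.1) else none))

-- the arithmetic adjacency test of B's inner 'any'
def pvAdjacent (x y1 y2 : Int) (p : Int × Int) : Bool :=
  (p.1 == x && (p.2 == y1 - 1 || p.2 == y2)) ||
  ((p.1 == x - 1 || p.1 == x + 1) && (y1 - 1 ≤ p.2 && p.2 ≤ y2))

def yield_valid_parts_alt (grid : List String) (parts_with_boundaries : List (Int × (Int × Int) × (Int × Int))) : List Int :=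
  let symbol_positions := pvSymbolPositions grid
  parts_with_boundaries.foldl
    (fun acc p =>
      if symbol_positions.any (pvAdjacent p.2.1.1 p.2.1.2 p.2.2.2)
      then acc ++ [p.1] else acc)
    []

-- ===== PRECONDITION & SPEC =====
def Spec_yield_valid_parts (grid : List String) (parts_with_boundaries : List (Int × (Int × Int) × (Int × Int))) (out : List Int) : Prop := out = yield_valid_parts_alt grid parts_with_boundaries
instance (grid : List String) (parts_with_boundaries : List (Int × (Int × Int) × (Int × Int))) (out : List Int) : Decidable (Spec_yield_valid_parts grid parts_with_boundaries out) := by unfold Spec_yield_valid_parts; infer_instance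

-- ===== CLAIM (what is proved, stated in full; the proofs are below) =====
def Claim_equal_yield_valid_parts : Prop := ∀ (grid : List String) (parts_with_boundaries : List (Int × (Int × Int) × (Int × Int))), Dom_yield_valid_parts grid parts_with_boundaries → Spec_yield_valid_parts grid parts_with_boundaries (yield_valid_parts grid parts_with_boundaries)

-- ===== LEMMAS AND PROOFS =====

-- A's per-cell check: in bounds and a symbol
def pvCheck (grid : List String) (p : Int × Int) : Bool :=
  decide (0 ≤ p.1 ∧ p.1 < (grid.length : Int)) &&
  (decide (0 ≤ p.2 ∧ p.2 < (((PySem.List.pyGetD grid p.1 "").toList.length : Int))) &&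
   PySem.Set.contains pvSymbolsA (PySem.List.pyGetD (PySem.List.pyGetD grid p.1 "").toList p.2 ' '))

theorem pvSymbols_eq : pvSymbolsA = pvSymbolsB := by decide

theorem pvHitA_eq_any (grid : List String) (coords : List (Int × Int)) :
    pvHitA grid coords = coords.any (pvCheck grid) := by
  induction coords with
  | nil => rfl
  | cons hd tl ih =>
    obtain ⟨x, y⟩ := hd
    simp only [pvHitA, List.any_cons, ih, pvCheck]
    by_cases h1 : 0 ≤ x ∧ x < (grid.length : Int)
    · by_cases h2 : 0 ≤ y ∧ y < (((PySem.List.pyGetD grid x "").length : Int))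
      · by_cases h3 : PySem.Set.contains pvSymbolsA (PySem.List.pyGetD (PySem.List.pyGetD grid x "").toList y ' ') = true
        · simp [h1, h2, String.length_toList]
        · simp [h1, h2, String.length_toList]
      · simp [h1, h2, String.length_toList]
    · simp [h1, String.length_toList]

-- membership in B's symbol-coordinate list is exactly A's per-cell check
theorem pv_mem_symbolPositions (grid : List String) (p : Int × Int) :
    p ∈ pvSymbolPositions grid ↔ pvCheck grid p = true := by
  obtain ⟨x, y⟩ := p
  unfold pvSymbolPositions pvCheck
  rw [← pvSymbols_eq]
  simp only [List.mem_flatMap, List.mem_filterMap, PySem.List.mem_enumerate_iff, zero_add]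
  constructor
  · rintro ⟨r, ⟨k, hk, rfl⟩, c, ⟨j, hj, rfl⟩, hc⟩
    simp only at hj hc
    split_ifs at hc with hs
    · simp only [Option.some.injEq, Prod.mk.injEq] at hc
      obtain ⟨rfl, rfl⟩ := hc
      have hrow : PySem.List.pyGetD grid ((k : Int)) "" = grid[k] := by
        simp [List.getD_eq_getElem?_getD, List.getElem?_eq_getElem hk]
      have hch : PySem.List.pyGetD grid[k].toList ((j : Int)) ' ' = grid[k].toList[j] := by
        simp [List.getD_eq_getElem?_getD, List.getElem?_eq_getElem hj]
      simp only [hrow, hch, hs, Bool.and_eq_true, decide_eq_true_eq, and_true]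
      omega
  · intro h
    simp only [Bool.and_eq_true, decide_eq_true_eq] at h
    obtain ⟨⟨hx0, hxl⟩, ⟨hy0, hyl⟩, hs⟩ := h
    have hkl : x.toNat < grid.length := by omega
    have hrow : PySem.List.pyGetD grid x "" = grid[x.toNat] :=
      PySem.List.pyGetD_eq_getElem _ _ hx0 hxl
    have hjl : y.toNat < grid[x.toNat].toList.length := by
      rw [hrow] at hyl; omega
    have hch : PySem.List.pyGetD (PySem.List.pyGetD grid x "").toList y ' ' = grid[x.toNat].toList[y.toNat] := by
      rw [hrow]
      exact PySem.List.pyGetD_eq_getElem _ _ hy0 (by rw [hrow] at hyl; exact_mod_cast hyl)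
    rw [hch] at hs
    refine ⟨((x.toNat : Int), grid[x.toNat]), ⟨x.toNat, hkl, rfl⟩,
           ((y.toNat : Int), grid[x.toNat].toList[y.toNat]), ⟨y.toNat, hjl, rfl⟩, ?_⟩
    simp only [hs, if_true, Option.some.injEq, Prod.mk.injEq]
    exact ⟨Int.toNat_of_nonneg hx0, Int.toNat_of_nonneg hy0⟩

-- border membership is exactly the arithmetic adjacency test
theorem pv_mem_border (x y1 y2 : Int) (p : Int × Int) :
    p ∈ get_part_border_coords x y1 y2 ↔ pvAdjacent x y1 y2 p = true := by
  obtain ⟨a, b⟩ := p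
  unfold get_part_border_coords pvAdjacent
  simp only [List.mem_append, List.mem_map, List.mem_singleton, PySem.List.mem_pyRange_one,
    Prod.mk.injEq, Bool.or_eq_true, Bool.and_eq_true, beq_iff_eq, decide_eq_true_eq]
  constructor
  · rintro (((⟨y, ⟨h1, h2⟩, rfl, rfl⟩ | ⟨rfl, rfl⟩) | ⟨rfl, rfl⟩) | ⟨y, ⟨h1, h2⟩, rfl, rfl⟩) <;> simp_all
  · rintro (⟨rfl, (rfl | rfl)⟩ | ⟨(rfl | rfl), h1, h2⟩)
    · exact .inl (.inl (.inr ⟨rfl, rfl⟩))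
    · exact .inl (.inr ⟨rfl, rfl⟩)
    · exact .inl (.inl (.inl ⟨b, ⟨by omega, by omega⟩, rfl, rfl⟩))
    · exact .inr ⟨b, ⟨by omega, by omega⟩, rfl, rfl⟩

theorem pv_hit_eq (grid : List String) (x y1 y2 : Int) :
    pvHitA grid (get_part_border_coords x y1 y2) =
      (pvSymbolPositions grid).any (pvAdjacent x y1 y2) := by
  rw [pvHitA_eq_any]
  rw [Bool.eq_iff_iff]
  simp only [List.any_eq_true]
  constructor
  · rintro ⟨p, hb, hc⟩
    exact ⟨p, (pv_mem_symbolPositions grid p).mpr hc, (pv_mem_border x y1 y2 p).mp hb⟩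
  · rintro ⟨p, hs, ha⟩
    exact ⟨p, (pv_mem_border x y1 y2 p).mpr ha, (pv_mem_symbolPositions grid p).mp hs⟩

-- ===== VERDICT (by name: the statement is the Claim_ definition above) =====
theorem yield_valid_parts_spec : Claim_equal_yield_valid_parts := by
  intro grid parts _
  unfold Spec_yield_valid_parts yield_valid_parts yield_valid_parts_alt
  simp only [pv_hit_eq]
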